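-- pv_equiv track=rewrite | github.com/noob888/etl-project | transform.py | determine_pick_status
-- ===== SOURCE A (Python) =====
-- def determine_pick_status(status_ids):
--     if any(status == 5 for status in status_ids) and any(status == 10 for status in status_ids):
--         return 'Atleast one item is pickable'
--     elif all(status == 5 for status in status_ids):
--         return 'No items are pickable'
--     elif all(status == 10 for status in status_ids):
--         return 'All items are pickable'
--     else:
--         return 'Unknown'
-- ===== SOURCE B (Python) =====
-- def determine_pick_status(status_ids):
--     has5 = has10 = other = False
--     for s in status_ids:
--         if s == 5:
--             has5 = True
--         elif s == 10:
--             has10 = True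
--         else:
--             other = True
--     if has5 and has10:
--         return 'Atleast one item is pickable'
--     if not has10 and not other:
--         return 'No items are pickable'
--     if has10 and not has5 and not other:
--         return 'All items are pickable'
--     return 'Unknown'
-- ===== Notes on version B (the rewrite author's own statement) =====
-- stated objective: alternative
-- what changed: Replaces A's four separate any/all scans of the list by a single pass maintaining three boolean flags (saw 5, saw 10, saw other) followed by a constant-time decision table.
import Mathlib
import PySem

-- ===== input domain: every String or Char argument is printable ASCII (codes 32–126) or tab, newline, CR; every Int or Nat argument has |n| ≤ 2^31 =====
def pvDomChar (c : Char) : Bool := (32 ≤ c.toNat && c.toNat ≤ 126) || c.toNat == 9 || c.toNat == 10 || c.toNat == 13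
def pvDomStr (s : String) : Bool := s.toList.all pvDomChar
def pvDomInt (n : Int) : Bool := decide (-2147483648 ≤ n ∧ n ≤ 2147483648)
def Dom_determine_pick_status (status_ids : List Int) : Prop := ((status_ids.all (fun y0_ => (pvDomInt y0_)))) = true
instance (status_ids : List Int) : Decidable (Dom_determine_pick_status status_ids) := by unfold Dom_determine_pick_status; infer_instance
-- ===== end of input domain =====

-- B replaces A's four separate any/all scans by one pass keeping three flags (saw 5, saw 10, saw other) and a decision table.


-- ===== PORT A =====
def determine_pick_status (status_ids : List Int) : String :=
  if (status_ids.any (fun status => status == 5)) && (status_ids.any (fun status => status == 10)) then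
    "Atleast one item is pickable"
  else if status_ids.all (fun status => status == 5) then
    "No items are pickable"
  else if status_ids.all (fun status => status == 10) then
    "All items are pickable"
  else
    "Unknown"

-- ===== PORT B =====
def pickStep (acc : Bool × Bool × Bool) (s : Int) : Bool × Bool × Bool :=
  if s == 5 then (true, acc.2.1, acc.2.2)
  else if s == 10 then (acc.1, true, acc.2.2)
  else (acc.1, acc.2.1, true)

def determine_pick_status_alt (status_ids : List Int) : String :=
  let f := status_ids.foldl pickStep (false, false, false)
  if f.1 && f.2.1 then "Atleast one item is pickable"
  else if !f.2.1 && !f.2.2 then "No items are pickable"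
  else if f.2.1 && !f.1 && !f.2.2 then "All items are pickable"
  else "Unknown"

-- ===== PRECONDITION & SPEC =====
def Spec_determine_pick_status (status_ids : List Int) (out : String) : Prop := out = determine_pick_status_alt status_ids
instance (status_ids : List Int) (out : String) : Decidable (Spec_determine_pick_status status_ids out) := by unfold Spec_determine_pick_status; infer_instance

-- ===== CLAIM (what is proved, stated in full; the proofs are below) =====
def Claim_equal_determine_pick_status : Prop := ∀ (status_ids : List Int), Dom_determine_pick_status status_ids → Spec_determine_pick_status status_ids (determine_pick_status status_ids)

-- ===== LEMMAS AND PROOFS =====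

-- ===== VERDICT (by name: the statement is the Claim_ definition above) =====
lemma beq_dec_int (x y : Int) : (x == y) = decide (x = y) := rfl

lemma pick_foldl (l : List Int) (a b c : Bool) :
    l.foldl pickStep (a, b, c) =
      (a || l.any (fun s => s == 5), b || l.any (fun s => s == 10),
        c || l.any (fun s => !(s == 5) && !(s == 10))) := by
  induction l generalizing a b c with
  | nil => simp
  | cons x t ih =>
    by_cases h5 : x = 5 <;> by_cases h10 : x = 10 <;>
      simp [pickStep, beq_dec_int, h5, h10, ih]

lemma all5_eq (l : List Int) :
    l.all (fun s => s == 5) =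
      (!(l.any (fun s => s == 10)) && !(l.any (fun s => !(s == 5) && !(s == 10)))) := by
  induction l with
  | nil => rfl
  | cons x t ih =>
    by_cases h5 : x = 5 <;> by_cases h10 : x = 10 <;>
      simp only [beq_dec_int] at ih ⊢ <;> simp [h5, h10, ih]

lemma all10_eq (l : List Int) :
    l.all (fun s => s == 10) =
      (!(l.any (fun s => s == 5)) && !(l.any (fun s => !(s == 5) && !(s == 10)))) := by
  induction l with
  | nil => rfl
  | cons x t ih =>
    by_cases h5 : x = 5 <;> by_cases h10 : x = 10 <;>
      simp only [beq_dec_int] at ih ⊢ <;> simp [h5, h10, ih]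

theorem determine_pick_status_spec : Claim_equal_determine_pick_status := by
  intro l _
  unfold Spec_determine_pick_status determine_pick_status determine_pick_status_alt
  rw [pick_foldl, all5_eq, all10_eq]
  simp only [Bool.false_or]
  generalize l.any (fun s => s == 5) = a
  generalize l.any (fun s => s == 10) = b
  generalize l.any (fun s => !(s == 5) && !(s == 10)) = c
  cases a <;> cases b <;> cases c <;> rfl
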